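-- pv_equiv track=rewrite | github.com/VIBogdanov/demo-python | src/demo/puzzles.py | get_min_permutations
-- ===== SOURCE A (Python) =====
-- from collections.abc import Generator, Iterable, Iterator
-- from typing import Literal, TypeAlias, TypeVar, cast
--
-- T = TypeVar("T")
--
-- def get_min_permutations(source_list: Iterable[T], target_list: Iterable[T]) -> int:
--     """
--     Подсчитывает минимальное количество перестановок, которое необходимо произвести для того,
--     чтобы из исходного списка source_list получить целевой список target_list. При этом порядок
--     следования и непрерывность списков не имеют значения.
--
--     Args:
--         source_list (Iterable[T]): Исходный список
--
--         target_list (Iterable[T]): Целевой список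
--
--     Returns:
--         int: Минимальное количество перестановок
--
--     Example:
--         >>> source = [10, 31, 15, 22, 14, 17, 16]
--             target = [16, 22, 14, 10, 31, 15, 17]
--             get_min_permutations(source, target)
--             3
--     """
--     # формируем список из номеров позиций для каждого значения из целевого списка.
--     # Само значение является ключом.
--     target_index: dict[T, int] = {n: i for i, n in enumerate(target_list)}
--     # Генератор, который формирует номер позиции, на которую нужно переставить значение из исходного списка.
--     source_index_generator: Generator[int, None, None] = (
--         target_index[source_item] for source_item in source_list
--     )
--     count: int = 0
--     # Получаем целевой номер позиции для первого значения из исходного списка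
--     try:
--         prev_index = next(source_index_generator)
--     except StopIteration:
--         return count  # список пуст
--     # Попарно сравниваем целевые номера позиций для значений исходного списка.
--     # Если номера позиций не по возрастанию, то требуется перестановка
--     for next_index in source_index_generator:
--         if prev_index > next_index:
--             count += 1
--         else:
--             prev_index = next_index
--
--     return count
-- ===== SOURCE B (Python) =====
-- def get_min_permutations(source_list, target_list):
--     target_index = {n: i for i, n in enumerate(target_list)}
--     seq = [target_index[x] for x in source_list]
--     # table pass: prefix_max[i] = max(seq[:i+1])
--     prefix_max = []
--     m = None
--     for v in seq:
--         m = v if m is None or v > m else m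
--         prefix_max.append(m)
--     # counting pass: element i needs a move iff something earlier maps after it
--     return sum(1 for s, m in zip(seq[1:], prefix_max) if s < m)
-- ===== Notes on version B (the rewrite author's own statement) =====
-- stated objective: alternative
-- what changed: A's single incremental loop that either counts or advances a carried prev pointer is replaced by materializing the position sequence, building an explicit prefix-maximum table in one pass, and counting seq[i] < prefix_max[i-1] in a separate flat zip pass.
import Mathlib
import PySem

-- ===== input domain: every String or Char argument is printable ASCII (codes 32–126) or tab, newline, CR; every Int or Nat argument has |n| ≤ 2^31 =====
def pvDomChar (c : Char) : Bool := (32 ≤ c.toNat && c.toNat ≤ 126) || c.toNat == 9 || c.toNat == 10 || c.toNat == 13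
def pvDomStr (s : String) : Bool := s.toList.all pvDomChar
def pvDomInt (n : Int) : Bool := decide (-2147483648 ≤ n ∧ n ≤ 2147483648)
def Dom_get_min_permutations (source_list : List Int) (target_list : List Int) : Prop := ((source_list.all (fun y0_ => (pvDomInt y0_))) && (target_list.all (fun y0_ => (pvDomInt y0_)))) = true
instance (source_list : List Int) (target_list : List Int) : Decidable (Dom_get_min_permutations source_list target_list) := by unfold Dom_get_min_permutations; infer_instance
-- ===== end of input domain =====

-- B replaces A's incremental count-or-advance loop by an explicit prefix-maximum table plus a flat counting pass (alternative decomposition, same cost).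


-- ===== PORT A =====
def get_min_permutations (source_list : List Int) (target_list : List Int) : Int :=
  let target_index : PySem.Dict Int Int :=
    (PySem.List.enumerate target_list).foldl (fun d p => d.insert p.2 p.1) PySem.Dict.empty
  -- target_index[source_item]: Pre_ guarantees the key is present, so getD 0 never fires
  let idxs := source_list.map (fun x => (target_index.get? x).getD 0)
  match idxs with
  | [] => 0
  | prev :: rest =>
    (rest.foldl
      (fun st next => if st.1 > next then (st.1, st.2 + 1) else (next, st.2))
      (prev, (0 : Int))).2

-- ===== PORT B =====
def get_min_permutations_alt (source_list : List Int) (target_list : List Int) : Int :=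
  let target_index : PySem.Dict Int Int :=
    (PySem.List.enumerate target_list).foldl (fun d p => d.insert p.2 p.1) PySem.Dict.empty
  let seq := source_list.map (fun x => (target_index.get? x).getD 0)
  let prefix_max :=
    (seq.foldl
      (fun st v =>
        let m := match st.1 with
          | none => v
          | some m => if v > m then v else m
        (some m, st.2 ++ [m]))
      ((none : Option Int), ([] : List Int))).2
  ((seq.drop 1).zip prefix_max).foldl (fun c p => if p.1 < p.2 then c + 1 else c) 0

-- ===== PRECONDITION & SPEC =====
-- Pre_ excludes source elements absent from target_list, on which A raises KeyError.
def Pre_get_min_permutations (source_list : List Int) (target_list : List Int) : Prop :=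
  ∀ x ∈ source_list, x ∈ target_list
instance (source_list : List Int) (target_list : List Int) : Decidable (Pre_get_min_permutations source_list target_list) := by unfold Pre_get_min_permutations; infer_instance
def pvWitness_get_min_permutations : List Int × List Int := ([10, 31, 15, 22], [15, 22, 10, 31])

def Spec_get_min_permutations (source_list : List Int) (target_list : List Int) (out : Int) : Prop := out = get_min_permutations_alt source_list target_list
instance (source_list : List Int) (target_list : List Int) (out : Int) : Decidable (Spec_get_min_permutations source_list target_list out) := by unfold Spec_get_min_permutations; infer_instance

-- ===== CLAIM (what is proved, stated in full; the proofs are below) =====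
def Claim_equal_get_min_permutations : Prop := ∀ (source_list : List Int) (target_list : List Int), Dom_get_min_permutations source_list target_list → Pre_get_min_permutations source_list target_list → Spec_get_min_permutations source_list target_list (get_min_permutations source_list target_list)

-- ===== LEMMAS AND PROOFS =====

-- recursive form of B's prefix-maximum table, seeded with the running max p
def pvPms (p : Int) : List Int → List Int
  | [] => []
  | r :: rs => (if r > p then r else p) :: pvPms (if r > p then r else p) rs

-- recursive form of B's counting pass
def pvCnt : List (Int × Int) → Int
  | [] => 0
  | q :: qs => (if q.1 < q.2 then 1 else 0) + pvCnt qs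

theorem pvPm_fold (l : List Int) (p : Int) (acc : List Int) :
    (l.foldl
      (fun st v =>
        ((some (match st.1 with
          | none => v
          | some m => if v > m then v else m) : Option Int),
         st.2 ++ [match st.1 with
          | none => v
          | some m => if v > m then v else m]))
      ((some p : Option Int), acc)).2 = acc ++ pvPms p l := by
  induction l generalizing p acc with
  | nil => simp [pvPms]
  | cons r rs ih => simp [pvPms, ih, List.append_assoc]

theorem pvCnt_fold (l : List (Int × Int)) (c : Int) :
    l.foldl (fun c p => if p.1 < p.2 then c + 1 else c) c = c + pvCnt l := by
  induction l generalizing c with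
  | nil => simp [pvCnt]
  | cons q qs ih =>
    simp only [List.foldl_cons, pvCnt, ih]
    split_ifs <;> ring

theorem pvLoopA_eq (l : List Int) (p c : Int) :
    (l.foldl
      (fun st next => if st.1 > next then (st.1, st.2 + 1) else (next, st.2))
      (p, c)).2 = c + pvCnt (l.zip (p :: pvPms p l)) := by
  induction l generalizing p c with
  | nil => simp [pvCnt]
  | cons r rs ih =>
    simp only [List.foldl_cons, pvPms, List.zip_cons_cons, pvCnt]
    by_cases h : p > r
    · have hr : ¬ r > p := by omega
      simp [h, hr, ih]
      ring
    · have hm : (if r > p then r else p) = r := by omega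
      have hlt : ¬ r < p := by omega
      simp [h, hm, ih]

theorem pvBody_eq (seq : List Int) :
    (match seq with
     | [] => (0 : Int)
     | prev :: rest =>
       (rest.foldl
         (fun st next => if st.1 > next then (st.1, st.2 + 1) else (next, st.2))
         (prev, (0 : Int))).2)
    =
    (let prefix_max :=
      (seq.foldl
        (fun st v =>
          let m := match st.1 with
            | none => v
            | some m => if v > m then v else m
          (some m, st.2 ++ [m]))
        ((none : Option Int), ([] : List Int))).2
     ((seq.drop 1).zip prefix_max).foldl (fun c p => if p.1 < p.2 then c + 1 else c) (0 : Int)) := by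
  cases seq with
  | nil => simp
  | cons p rest =>
    simp only [List.foldl_cons, List.drop_succ_cons, List.drop_zero]
    rw [pvLoopA_eq, pvPm_fold rest p ([] ++ [p]), pvCnt_fold]
    simp

-- ===== VERDICT (by name: the statement is the Claim_ definition above) =====
theorem get_min_permutations_spec : Claim_equal_get_min_permutations := by
  intro source_list target_list _ _
  unfold Spec_get_min_permutations get_min_permutations get_min_permutations_alt
  exact pvBody_eq _
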